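-- pv_equiv track=rewrite | github.com/Leo-rojo/Quality_of_Experience_in_Video_Streaming_Status_Quo_Pitfalls_and_Guidelines | Fig_3/code_howmanygoout_in_dataset/cap_tr_te.py | index_same_rows
-- ===== SOURCE A (Python) =====
-- def samearray(a,b):
--     for i in range(len(a)):
--         if a[i]!=b[i]:
--             return False
--     return True
--
-- def index_same_rows(array_of_users):
--     # extract index of rows wich are identical across users
--     index_identical_rows = []
--     for idx_row, row in enumerate(array_of_users[0]):
--         identical = True
--         for idx_user, user in enumerate(array_of_users):
--             if not samearray(row, user[idx_row]):
--                 identical = False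
--                 break
--         if identical:
--             index_identical_rows.append(idx_row)
--     return index_identical_rows
-- ===== SOURCE B (Python) =====
-- def index_same_rows(array_of_users):
--     # a row index is kept when every user's row at that index is the same row:
--     # collect the rows into a set and test that only one distinct row remains
--     n_rows = len(array_of_users[0])
--     return [idx for idx in range(n_rows)
--             if len({tuple(user[idx]) for user in array_of_users}) == 1]
-- ===== Notes on version B (the rewrite author's own statement) =====
-- stated objective: idiomatic
-- what changed: Replaces the per-user samearray early-exit comparison loop by collecting every user's row at each index into a set and testing that one distinct row remains; Pre_ excludes inputs where some user has fewer rows than user 0 or a shorter row at some index, on which A's left-to-right early exit decides between returning and raising IndexError while B's whole-row comparison may raise or return where A does the opposite.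
-- intended difference: On inputs where at some row index every user's row starts with user 0's row there but some user's row is strictly longer, A counts the index as identical (samearray scans only the first row's length) while B does not; B's is the intended value since the rows are not identical. — e.g. on index_same_rows([[[1]], [[1, 2]]]): A returns [0], B returns []
-- outside the precondition, e.g. on index_same_rows([[[1], [2]], [[9], [9]], [[5]]]): A returns [], B raises IndexError
import Mathlib
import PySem

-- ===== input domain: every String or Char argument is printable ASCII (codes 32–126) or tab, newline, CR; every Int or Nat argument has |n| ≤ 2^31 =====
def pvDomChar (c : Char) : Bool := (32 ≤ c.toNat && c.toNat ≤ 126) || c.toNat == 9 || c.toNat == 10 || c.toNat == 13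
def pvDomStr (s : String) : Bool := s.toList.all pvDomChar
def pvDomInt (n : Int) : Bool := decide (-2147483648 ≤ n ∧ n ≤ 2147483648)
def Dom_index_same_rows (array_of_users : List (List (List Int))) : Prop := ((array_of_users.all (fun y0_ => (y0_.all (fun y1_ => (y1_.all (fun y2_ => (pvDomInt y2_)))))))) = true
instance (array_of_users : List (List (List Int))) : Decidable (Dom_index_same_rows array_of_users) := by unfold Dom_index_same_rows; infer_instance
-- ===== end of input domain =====

-- B gathers every user's row at each index into a set and keeps the index when only one
-- distinct row remains, instead of A's per-user samearray comparison loop with early exit.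

-- ===== PORT A =====
-- 'for i in range(len(a)): if a[i]!=b[i]: return False' — raise (= none) if b[i] is out of range
def samearrayGo (a b : List Int) : List Nat → Option Bool
  | [] => some true
  | i :: rest =>
    match PySem.List.pyGet? a (i : Int), PySem.List.pyGet? b (i : Int) with
    | some ai, some bi => if ai ≠ bi then some false else samearrayGo a b rest
    | _, _ => none

def samearray (a b : List Int) : Option Bool := samearrayGo a b (List.range a.length)

-- inner 'for idx_user, user in enumerate(array_of_users)' loop with break-on-mismatch
def innerUsers (idxRow : Nat) (row : List Int) : List (List (List Int)) → Option Bool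
  | [] => some true
  | user :: rest =>
    match PySem.List.pyGet? user (idxRow : Int) with
    | none => none
    | some urow =>
      match samearray row urow with
      | none => none
      | some false => some false
      | some true => innerUsers idxRow row rest

-- outer 'for idx_row, row in enumerate(array_of_users[0])' loop
def outerRows (aou : List (List (List Int))) : Nat → List (List Int) → Option (List Int)
  | _, [] => some []
  | idx, row :: rest =>
    match innerUsers idx row aou with
    | none => none
    | some identical =>
      match outerRows aou (idx+1) rest with
      | none => none
      | some tl => some (if identical then (idx : Int) :: tl else tl)

def index_same_rows (array_of_users : List (List (List Int))) : List Int :=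
  match array_of_users with
  | [] => []  -- array_of_users[0] raises: outside Pre_
  | first :: _ => (outerRows array_of_users 0 first).getD []

-- ===== PORT B =====
-- {tuple(user[idx]) for user in array_of_users}
def rowsAt (aou : List (List (List Int))) (idx : Nat) : PySem.Set (List Int) :=
  PySem.Set.ofList (aou.map (fun user => (PySem.List.pyGet? user (idx : Int)).getD []))

def index_same_rows_alt (array_of_users : List (List (List Int))) : List Int :=
  match array_of_users with
  | [] => []  -- len(array_of_users[0]) raises: outside Pre_
  | first :: _ =>
    ((List.range first.length).filter
      (fun idx => (rowsAt array_of_users idx).length = 1)).map (fun (idx : Nat) => (idx : Int))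

-- ===== PRECONDITION & SPEC =====
-- Pre_ excludes inputs where some user has fewer rows than user 0 or a shorter row at some
-- index: there A's left-to-right early exit decides between returning and raising IndexError
-- while B's whole-row comparison may raise or return where A does the opposite (see cites).
def Pre_index_same_rows (array_of_users : List (List (List Int))) : Prop :=
  array_of_users ≠ [] ∧
  ∀ u ∈ array_of_users,
    (array_of_users.headD []).length ≤ u.length ∧
    ∀ idx < (array_of_users.headD []).length,
      ((array_of_users.headD []).getD idx []).length ≤ (u.getD idx []).length

instance (array_of_users : List (List (List Int))) : Decidable (Pre_index_same_rows array_of_users) := by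
  unfold Pre_index_same_rows; infer_instance

def pvWitness_index_same_rows : List (List (List Int)) :=
  [[[1], [2, 3]], [[1], [2, 9]], [[1], [2, 3]]]

-- On inputs where at some row index every user's row starts with user 0's row there but some
-- user's row is a strictly longer extension of it, A counts the index as identical (samearray
-- scans only the first row's length) while B does not; B's value is the intended one: the rows
-- are not identical.
def D_index_same_rows (array_of_users : List (List (List Int))) : Prop :=
  ∃ f ∈ array_of_users.head?, ∃ i ∈ List.range f.length,
    (∀ u ∈ array_of_users, f.getD i [] <+: u.getD i []) ∧
    ∃ u ∈ array_of_users, u.getD i [] ≠ f.getD i []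

instance (array_of_users : List (List (List Int))) : Decidable (D_index_same_rows array_of_users) := by
  unfold D_index_same_rows; infer_instance

def Spec_index_same_rows (array_of_users : List (List (List Int))) (out : List Int) : Prop := ¬ D_index_same_rows array_of_users → out = index_same_rows_alt array_of_users
instance (array_of_users : List (List (List Int))) (out : List Int) : Decidable (Spec_index_same_rows array_of_users out) := by unfold Spec_index_same_rows; infer_instance

def pvDiffWitness_index_same_rows : List (List (List Int)) := [[[1]], [[1, 2]]]
def pvDiffWitnessOut_index_same_rows : (List Int) × (List Int) := ([0], [])

-- ===== CLAIM (what is proved, stated in full; the proofs are below) =====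
def Claim_unchanged_index_same_rows : Prop := ∀ (array_of_users : List (List (List Int))), Dom_index_same_rows array_of_users → Pre_index_same_rows array_of_users → Spec_index_same_rows array_of_users (index_same_rows array_of_users)
def Claim_changed_index_same_rows : Prop := Dom_index_same_rows (pvDiffWitness_index_same_rows) ∧ Pre_index_same_rows (pvDiffWitness_index_same_rows) ∧ D_index_same_rows (pvDiffWitness_index_same_rows) ∧ index_same_rows (pvDiffWitness_index_same_rows) = pvDiffWitnessOut_index_same_rows.1 ∧ index_same_rows_alt (pvDiffWitness_index_same_rows) = pvDiffWitnessOut_index_same_rows.2 ∧ pvDiffWitnessOut_index_same_rows.1 ≠ pvDiffWitnessOut_index_same_rows.2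
def Claim_exact_index_same_rows : Prop := ∀ (array_of_users : List (List (List Int))), Dom_index_same_rows array_of_users → Pre_index_same_rows array_of_users → D_index_same_rows array_of_users → index_same_rows array_of_users ≠ index_same_rows_alt array_of_users

-- ===== LEMMAS AND PROOFS =====

-- A's per-index condition: every user's row, cut to the first user's row length, matches
def aCond (aou : List (List (List Int))) (idx : Nat) : Bool :=
  aou.all (fun u =>
    (u.getD idx []).take (((aou.headD []).getD idx []).length) == (aou.headD []).getD idx [])

-- the paired-recursion specification of samearray
def cmpSpec : List Int → List Int → Option Bool
  | [], _ => some true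
  | _ :: _, [] => none
  | x :: xs, y :: ys => if x ≠ y then some false else cmpSpec xs ys

theorem samearrayGo_range' (a b : List Int) :
    ∀ (l s : Nat), s + l = a.length →
      samearrayGo a b (List.range' s l) = cmpSpec (a.drop s) (b.drop s) := by
  intro l
  induction l with
  | zero =>
    intro s hs
    simp only [List.range'_zero]
    have : a.drop s = [] := List.drop_eq_nil_of_le (by omega)
    simp [samearrayGo, this, cmpSpec]
  | succ n ih =>
    intro s hs
    have hsa : s < a.length := by omega
    have hda : a.drop s = a[s] :: a.drop (s + 1) := List.drop_eq_getElem_cons hsa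
    have hga : PySem.List.pyGet? a (s : Int) = some a[s] := PySem.List.pyGet?_ofNat a s hsa
    rw [List.range'_succ]
    by_cases hsb : s < b.length
    · have hdb : b.drop s = b[s] :: b.drop (s + 1) := List.drop_eq_getElem_cons hsb
      have hgb : PySem.List.pyGet? b (s : Int) = some b[s] := PySem.List.pyGet?_ofNat b s hsb
      simp only [samearrayGo, hga, hgb, hda, hdb, cmpSpec]
      by_cases h : a[s] ≠ b[s]
      · simp [h]
      · simp only [h, ite_false]
        simpa using ih (s+1) (by omega)
    · have hdb : b.drop s = [] := List.drop_eq_nil_of_le (by omega)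
      have hgb : PySem.List.pyGet? b (s : Int) = none := by
        rw [PySem.List.pyGet?_natCast]; simp; omega
      simp only [samearrayGo, hga, hgb, hda, hdb, cmpSpec]

theorem samearray_eq_cmpSpec (a b : List Int) : samearray a b = cmpSpec a b := by
  have := samearrayGo_range' a b a.length 0 (by omega)
  simpa [samearray, List.range_eq_range'] using this

theorem cmpSpec_eq_some (a : List Int) :
    ∀ b, a.length ≤ b.length → cmpSpec a b = some (b.take a.length == a) := by
  induction a with
  | nil => intro b _; simp [cmpSpec]
  | cons x xs ih =>
    intro b hb
    cases b with
    | nil => simp at hb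
    | cons y ys =>
      simp only [cmpSpec, List.length_cons, List.take_succ_cons]
      by_cases h : x ≠ y
      · have : (y :: List.take xs.length ys == x :: xs) = false :=
          beq_eq_false_iff_ne.2 (by simp; intro hy; exact absurd hy.symm h)
        simp [h, this]
      · simp only [not_not] at h
        subst h
        rw [if_neg (by simp), ih ys (by simpa using hb)]
        cases hbeq : (List.take xs.length ys == xs) with
        | true => simp [beq_iff_eq.1 hbeq]
        | false =>
          have : (x :: List.take xs.length ys == x :: xs) = false := by
            rw [beq_eq_false_iff_ne] at hbeq ⊢; simpa using hbeq
          simp [this]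

theorem inner_eq (aou : List (List (List Int))) (idx : Nat)
    (hlen : ∀ u ∈ aou, idx < u.length ∧
      (((aou.headD []).getD idx []).length ≤ (u.getD idx []).length)) :
    ∀ us : List (List (List Int)), (∀ u ∈ us, u ∈ aou) →
      innerUsers idx ((aou.headD []).getD idx []) us
        = some (us.all (fun u =>
            (u.getD idx []).take (((aou.headD []).getD idx []).length)
              == (aou.headD []).getD idx [])) := by
  intro us
  induction us with
  | nil => intro _; simp [innerUsers]
  | cons u rest ih =>
    intro hsub
    obtain ⟨hu, hrowlen⟩ := hlen u (hsub u (by simp))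
    have hg : PySem.List.pyGet? u (idx : Int) = some u[idx] :=
      PySem.List.pyGet?_ofNat u idx hu
    have hgetD : u.getD idx [] = u[idx] := List.getD_eq_getElem u [] hu
    rw [hgetD] at hrowlen
    simp only [innerUsers, hg, samearray_eq_cmpSpec, cmpSpec_eq_some _ _ hrowlen]
    cases hbeq : (u[idx].take (((aou.headD []).getD idx []).length) == (aou.headD []).getD idx []) with
    | true =>
      simp only [List.all_cons, hgetD, hbeq, Bool.true_and]
      exact ih (fun v hv => hsub v (by simp [hv]))
    | false =>
      simp only [List.all_cons, hgetD, hbeq, Bool.false_and]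

theorem outer_eq (first : List (List Int)) (others : List (List (List Int)))
    (hlen : ∀ u ∈ first :: others, first.length ≤ u.length ∧
      ∀ idx < first.length, (first.getD idx []).length ≤ (u.getD idx []).length) :
    ∀ (l i : Nat), i + l = first.length →
      outerRows (first :: others) i (first.drop i)
        = some (((List.range' i l).filter (fun idx => aCond (first :: others) idx)).map
            (fun (idx : Nat) => (idx : Int))) := by
  intro l
  induction l with
  | zero =>
    intro i hi
    have hd : first.drop i = [] := List.drop_eq_nil_of_le (by omega)
    simp [hd, outerRows]
  | succ n ih =>
    intro i hi
    have hif : i < first.length := by omega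
    have hd : first.drop i = first[i] :: first.drop (i + 1) := List.drop_eq_getElem_cons hif
    have hrowD : (((first :: others) : List (List (List Int))).headD []).getD i [] = first[i] := by
      simp only [List.headD_cons]
      exact List.getD_eq_getElem first [] hif
    have hinner : innerUsers i first[i] (first :: others)
        = some (aCond (first :: others) i) := by
      have h2 := inner_eq (first :: others) i
        (fun u hu => ⟨lt_of_lt_of_le hif (hlen u hu).1, (hlen u hu).2 i hif⟩)
        (first :: others) (fun u hu => hu)
      unfold aCond
      rw [hrowD] at h2 ⊢
      exact h2
    rw [hd]
    simp only [outerRows, hinner, ih (i+1) (by omega)]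
    rw [List.range'_succ, List.filter_cons]
    cases hb : aCond (first :: others) i with
    | true => simp
    | false => simp

theorem set_len_one {α : Type} [BEq α] [LawfulBEq α] (x : α) (xs : List α) :
    (PySem.Set.ofList (x :: xs)).length = 1 ↔ ∀ y ∈ xs, y = x := by
  have hx : x ∈ PySem.Set.ofList (x :: xs) := (PySem.Set.mem_ofList _ _).2 (by simp)
  have hnd : (PySem.Set.ofList (x :: xs)).Nodup := PySem.Set.nodup_ofList _
  constructor
  · intro h y hy
    have hyy : y ∈ PySem.Set.ofList (x :: xs) := (PySem.Set.mem_ofList _ _).2 (by simp [hy])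
    obtain ⟨z, hz⟩ := List.length_eq_one_iff.1 h
    rw [hz] at hx hyy
    simp at hx hyy
    rw [hx, hyy]
  · intro h
    have hmem : ∀ y ∈ PySem.Set.ofList (x :: xs), y = x := by
      intro y hy
      rcases List.mem_cons.1 ((PySem.Set.mem_ofList _ _).1 hy) with h0 | h1
      · exact h0
      · exact h y h1
    rcases hs : PySem.Set.ofList (x :: xs) with - | ⟨a, rest⟩
    · rw [hs] at hx; simp at hx
    · rw [hs] at hmem hnd
      rcases rest with - | ⟨b, rest'⟩
      · rfl
      · exfalso
        have ha : a = x := hmem a (by simp)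
        have hb : b = x := hmem b (by simp)
        have := List.nodup_cons.1 hnd
        exact this.1 (by simp [ha, hb])

-- B's per-index condition ↔ every user's whole row at idx equals the first user's row
theorem bCond_iff (first : List (List Int)) (others : List (List (List Int))) (idx : Nat)
    (hif : idx < first.length)
    (hlen : ∀ u ∈ first :: others, idx < u.length) :
    (rowsAt (first :: others) idx).length = 1
      ↔ ∀ u ∈ first :: others, u.getD idx [] = first.getD idx [] := by
  have hfg : (PySem.List.pyGet? first (idx : Int)).getD [] = first.getD idx [] := by
    rw [PySem.List.pyGet?_ofNat first idx hif]
    exact Option.getD_some.trans (List.getD_eq_getElem first [] hif).symm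
  unfold rowsAt
  rw [List.map_cons, hfg, set_len_one]
  constructor
  · intro h u hu
    rcases List.mem_cons.1 hu with h0 | hmem
    · rw [h0]
    · have hui : idx < u.length := hlen u hu
      have := h _ (List.mem_map_of_mem hmem)
      rw [PySem.List.pyGet?_ofNat u idx hui, Option.getD_some] at this
      exact (List.getD_eq_getElem u [] hui).trans this
  · intro h y hy
    obtain ⟨u, hu, rfl⟩ := List.mem_map.1 hy
    have hui : idx < u.length := hlen u (by simp [hu])
    rw [PySem.List.pyGet?_ofNat u idx hui, Option.getD_some]
    exact (List.getD_eq_getElem u [] hui).symm.trans (h u (by simp [hu]))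

-- Under Pre_ and ¬D_, the two per-index conditions agree
theorem cond_agree (first : List (List Int)) (others : List (List (List Int)))
    (hlen : ∀ u ∈ first :: others, first.length ≤ u.length ∧
      ∀ i < first.length, (first.getD i []).length ≤ (u.getD i []).length)
    (hnd : ¬ D_index_same_rows (first :: others)) (idx : Nat) (hif : idx < first.length) :
    aCond (first :: others) idx = ((rowsAt (first :: others) idx).length = 1 : Bool) := by
  have hD : ¬ ((∀ u ∈ first :: others, first.getD idx [] <+: u.getD idx []) ∧
      ∃ u ∈ first :: others, u.getD idx [] ≠ first.getD idx []) := by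
    intro hc
    exact hnd ⟨first, rfl, idx, List.mem_range.2 hif, hc.1, hc.2⟩
  have hB := bCond_iff first others idx hif
    (fun u hu => lt_of_lt_of_le hif (hlen u hu).1)
  cases ha : aCond (first :: others) idx with
  | false =>
    rcases List.all_eq_false.1 ha with ⟨u, hu, hne⟩
    have hne' : ¬ u.getD idx [] = first.getD idx [] := by
      intro he
      apply hne
      simp only [List.headD_cons, beq_iff_eq]
      rw [he, List.take_length]
    have hnot : ¬ (rowsAt (first :: others) idx).length = 1 := fun hc => hne' (hB.1 hc u hu)
    simp [hnot]
  | true =>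
    have hall : ∀ u ∈ first :: others,
        (u.getD idx []).take (first.getD idx []).length = first.getD idx [] := by
      intro u hu
      have h3 := List.all_eq_true.1 ha u hu
      simp only [List.headD_cons] at h3
      exact eq_of_beq h3
    have hpre : ∀ u ∈ first :: others, first.getD idx [] <+: u.getD idx [] := by
      intro u hu
      exact (hall u hu) ▸ List.take_prefix _ _
    have heq : ∀ u ∈ first :: others, u.getD idx [] = first.getD idx [] := by
      intro u hu
      by_contra hneq
      exact hD ⟨hpre, u, hu, hneq⟩
    simp [hB.2 heq]

-- membership characterization of a filtered range mapped to Int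
theorem mem_filter_range_map (n : Nat) (p : Nat → Bool) (k : Nat) :
    ((k : Int) ∈ ((List.range n).filter p).map (fun (i : Nat) => (i : Int))) ↔ (k < n ∧ p k) := by
  simp only [List.mem_map, List.mem_filter, List.mem_range]
  constructor
  · rintro ⟨i, ⟨h1, h2⟩, hcast⟩
    have : i = k := by exact_mod_cast hcast
    subst this
    exact ⟨h1, h2⟩
  · intro ⟨h1, h2⟩
    exact ⟨k, ⟨h1, h2⟩, rfl⟩

theorem index_same_rows_char (first : List (List Int)) (others : List (List (List Int)))
    (hlen : ∀ u ∈ first :: others, first.length ≤ u.length ∧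
      ∀ i < first.length, (first.getD i []).length ≤ (u.getD i []).length) :
    index_same_rows (first :: others)
      = ((List.range first.length).filter (fun idx => aCond (first :: others) idx)).map
          (fun (idx : Nat) => (idx : Int)) := by
  have h := outer_eq first others hlen first.length 0 (by omega)
  simp only [List.drop_zero] at h
  show (outerRows (first :: others) 0 first).getD [] = _
  rw [h, List.range_eq_range']
  rfl

-- ===== VERDICT (by name: the statement is the Claim_ definition above) =====
theorem index_same_rows_spec : Claim_unchanged_index_same_rows := by
  intro aou _ hPre hnD
  obtain ⟨hne, hlen⟩ := hPre
  cases aou with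
  | nil => exact absurd rfl hne
  | cons first others =>
    simp only [List.headD_cons] at hlen
    rw [index_same_rows_char first others hlen]
    show _ = index_same_rows_alt (first :: others)
    unfold index_same_rows_alt
    congr 1
    apply List.filter_congr
    intro idx hidx
    exact cond_agree first others hlen hnD idx (List.mem_range.1 hidx)

theorem index_same_rows_changed : Claim_changed_index_same_rows := by
  unfold Claim_changed_index_same_rows; decide

theorem index_same_rows_tight : Claim_exact_index_same_rows := by
  intro aou _ hPre hD
  obtain ⟨hne, hlen⟩ := hPre
  cases aou with
  | nil => exact absurd rfl hne
  | cons first others =>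
    simp only [List.headD_cons] at hlen
    unfold D_index_same_rows at hD
    obtain ⟨f, hf, idx, hidx', hall, u0, hu0, hne0⟩ := hD
    rw [List.head?_cons, Option.mem_some_iff] at hf
    subst hf
    have hidx : idx < first.length := List.mem_range.1 hidx'
    intro hEq
    have hA : (idx : Int) ∈ index_same_rows (first :: others) := by
      rw [index_same_rows_char first others hlen]
      refine (mem_filter_range_map _ _ _).2 ⟨hidx, ?_⟩
      show aCond (first :: others) idx = true
      refine List.all_eq_true.2 (fun u hu => ?_)
      simp only [List.headD_cons, beq_iff_eq]
      exact (List.prefix_iff_eq_take.1 (hall u hu)).symm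
    have hB : ¬ (idx : Int) ∈ index_same_rows_alt (first :: others) := by
      intro hc
      have hmem : idx < first.length ∧
          decide ((rowsAt (first :: others) idx).length = 1) = true :=
        (mem_filter_range_map first.length
          (fun i => decide ((rowsAt (first :: others) i).length = 1)) idx).1 hc
      have heq := (bCond_iff first others idx hidx
        (fun u hu => lt_of_lt_of_le hidx (hlen u hu).1)).1 (of_decide_eq_true hmem.2)
      exact hne0 (heq u0 hu0)
    rw [hEq] at hA
    exact hB hA
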